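-- pv_equiv track=rewrite | github.com/Defaultin/Funny-stuff | minimum_railway_platforms.py | minimum_railway_platforms
-- ===== SOURCE A (Python) =====
-- def minimum_railway_platforms(arrival: list[int], departure: list[int]) -> int:
--     platforms = max_platforms = 0
--     events = sorted(
--         [(time, "arrival") for time in arrival]
--         + [(time, "departure") for time in departure],
--         key=lambda x: x[0]
--     )
--
--     for _, event in events:
--         if event == "arrival":
--             platforms += 1
--             max_platforms = max(max_platforms, platforms)
--         else:
--             platforms -= 1
--
--     return max_platforms
-- ===== SOURCE B (Python) =====
-- def minimum_railway_platforms(arrival: list[int], departure: list[int]) -> int: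
--     arr = sorted(arrival)
--     dep = sorted(departure)
--     i = j = 0
--     platforms = best = 0
--     while i < len(arr):
--         if j == len(dep) or arr[i] <= dep[j]:
--             platforms += 1
--             i += 1
--             if platforms > best:
--                 best = platforms
--         else:
--             platforms -= 1
--             j += 1
--     return best
-- ===== Notes on version B (the rewrite author's own statement) =====
-- stated objective: alternative
-- what changed: Replaces A's build-tagged-event-list-then-sort-then-scan with two separately sorted lists merged on the fly by a two-pointer counting loop (no tagged event list is ever materialised, trailing departures are skipped), keeping A's tie rule of counting an arrival before an equal-time departure.
import Mathlib
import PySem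

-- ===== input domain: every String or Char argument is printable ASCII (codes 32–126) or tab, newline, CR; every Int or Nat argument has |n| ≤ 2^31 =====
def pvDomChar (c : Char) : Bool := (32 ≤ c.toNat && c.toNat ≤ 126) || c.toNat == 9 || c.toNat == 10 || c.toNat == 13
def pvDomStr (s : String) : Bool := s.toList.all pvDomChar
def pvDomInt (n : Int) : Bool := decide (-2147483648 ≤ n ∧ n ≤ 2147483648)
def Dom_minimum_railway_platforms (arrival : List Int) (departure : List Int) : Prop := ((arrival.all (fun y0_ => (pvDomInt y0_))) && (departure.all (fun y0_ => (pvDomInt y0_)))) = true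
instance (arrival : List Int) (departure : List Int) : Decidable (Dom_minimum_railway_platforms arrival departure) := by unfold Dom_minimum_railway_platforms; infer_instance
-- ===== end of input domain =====

-- B replaces A's tag-concatenate-sort-scan of one event list by two separately sorted
-- lists merged on the fly with a two-pointer counting loop (alternative decomposition;
-- same tie rule: an arrival is counted before an equal-time departure).

-- ===== PORT A =====
-- the body of A's for-loop: platforms += 1 / max update on "arrival", platforms -= 1 otherwise
def pvStepA (s : Int × Int) (e : Int × String) : Int × Int :=
  if e.2 == "arrival" then (s.1 + 1, max s.2 (s.1 + 1)) else (s.1 - 1, s.2)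

def minimum_railway_platforms (arrival : List Int) (departure : List Int) : Int :=
  let events := PySem.List.sorted
    (arrival.map (fun time => (time, "arrival")) ++ departure.map (fun time => (time, "departure")))
    (fun x => x.1) false
  (events.foldl pvStepA (0, 0)).2

-- ===== PORT B =====
-- Source B's while-loop: i, j indices into the two sorted lists, platforms / best counters
def pvLoopB (arr dep : List Int) (i j : Nat) (platforms best : Int) : Int :=
  if h : i < arr.length then
    if hc : dep.length ≤ j ∨ arr.getD i 0 ≤ dep.getD j 0 then
      pvLoopB arr dep (i + 1) j (platforms + 1)
        (if platforms + 1 > best then platforms + 1 else best)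
    else
      pvLoopB arr dep i (j + 1) (platforms - 1) best
  else best
termination_by arr.length - i + (dep.length - j)
decreasing_by
  · omega
  · have : j < dep.length := by omega
    omega

def minimum_railway_platforms_alt (arrival : List Int) (departure : List Int) : Int :=
  pvLoopB (PySem.List.sorted arrival (fun x => x) false)
          (PySem.List.sorted departure (fun x => x) false) 0 0 0 0

-- ===== PRECONDITION & SPEC =====
def Spec_minimum_railway_platforms (arrival : List Int) (departure : List Int) (out : Int) : Prop := out = minimum_railway_platforms_alt arrival departure
instance (arrival : List Int) (departure : List Int) (out : Int) : Decidable (Spec_minimum_railway_platforms arrival departure out) := by unfold Spec_minimum_railway_platforms; infer_instance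

-- ===== CLAIM (what is proved, stated in full; the proofs are below) =====
def Claim_equal_minimum_railway_platforms : Prop := ∀ (arrival : List Int) (departure : List Int), Dom_minimum_railway_platforms arrival departure → Spec_minimum_railway_platforms arrival departure (minimum_railway_platforms arrival departure)

-- ===== LEMMAS AND PROOFS =====

def pvTagA (t : Int) : Int × String := (t, "arrival")
def pvTagD (t : Int) : Int × String := (t, "departure")

-- merge of two (sorted) time lists into A's tagged event order: arrival first on ties
def pvMerge : List Int → List Int → List (Int × String)
  | [], ds => ds.map pvTagD
  | a :: as, [] => (a, "arrival") :: pvMerge as []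
  | a :: as, d :: ds =>
    if a ≤ d then (a, "arrival") :: pvMerge as (d :: ds)
    else (d, "departure") :: pvMerge (a :: as) ds

-- list-level version of B's loop, shaped like pvMerge
def pvLoopL : List Int → List Int → Int → Int → Int
  | [], _, _, best => best
  | _ :: as, [], p, best => pvLoopL as [] (p + 1) (max best (p + 1))
  | a :: as, d :: ds, p, best =>
    if a ≤ d then pvLoopL as (d :: ds) (p + 1) (max best (p + 1))
    else pvLoopL (a :: as) ds (p - 1) best

theorem pvInsert_map (c : String) (xs : List Int) (t : Int) :
    PySem.List.insertBy (fun p q => decide (p.1 < q.1)) (t, c) (xs.map (fun u => (u, c))) =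
      (PySem.List.insertBy (fun a b => decide (a < b)) t xs).map (fun u => (u, c)) := by
  induction xs with
  | nil => rfl
  | cons x xs ih =>
    simp only [List.map_cons, PySem.List.insertBy]
    by_cases h : t < x
    · simp [h]
    · simp [h, ih]

theorem pvFoldIns_map (c : String) (xs acc : List Int) :
    List.foldl (fun a x => PySem.List.insertBy (fun p q => decide (p.1 < q.1)) x a)
      (acc.map (fun u => (u, c))) (xs.map (fun u => (u, c))) =
      (List.foldl (fun a x => PySem.List.insertBy (fun p q => decide (p < q)) x a) acc xs).map
        (fun u => (u, c)) := by
  induction xs generalizing acc with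
  | nil => rfl
  | cons x xs ih =>
    simp only [List.map_cons, List.foldl_cons]
    rw [pvInsert_map c acc x, ih]

theorem pvMerge_nil_right (A : List Int) : pvMerge A [] = A.map pvTagA := by
  induction A with
  | nil => simp [pvMerge]
  | cons a as ih => simp [pvMerge, ih, pvTagA]

-- inserting a departure into a merge = merging after inserting into the departure list
theorem pvMerge_insert (A D : List Int) (t : Int) :
    PySem.List.insertBy (fun p q => decide (p.1 < q.1)) (t, "departure") (pvMerge A D) =
      pvMerge A (PySem.List.insertBy (fun a b => decide (a < b)) t D) := by
  induction A, D using pvMerge.induct with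
  | case1 ds =>
    simp only [pvMerge]
    exact pvInsert_map "departure" ds t
  | case2 a as ih =>
    simp only [pvMerge, PySem.List.insertBy]
    by_cases h : t < a
    · have : ¬ a ≤ t := by omega
      simp [h, this]
    · have : a ≤ t := by omega
      simp [h, this, ih, PySem.List.insertBy]
  | case3 a as d ds hle ih =>
    simp only [pvMerge, if_pos hle, PySem.List.insertBy]
    by_cases h : t < a
    · have htd : t < d := by omega
      have : ¬ a ≤ t := by omega
      simp [h, htd, pvMerge, this, hle]
    · have hat : a ≤ t := by omega
      by_cases h2 : t < d
      · simp [h, h2, pvMerge, hat, ih, PySem.List.insertBy]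
      · simp [h, h2, pvMerge, hle, ih, PySem.List.insertBy]
  | case4 a as d ds hle ih =>
    have hda : d < a := by omega
    simp only [pvMerge, if_neg hle, PySem.List.insertBy]
    by_cases h : t < d
    · have : ¬ a ≤ t := by omega
      simp [h, pvMerge, this, hle]
    · have hdt : d ≤ t := by omega
      simp [h, pvMerge, hle, ih]

theorem pvFoldIns_merge (ds : List Int) (A D : List Int) :
    List.foldl (fun a x => PySem.List.insertBy (fun p q => decide (p.1 < q.1)) x a)
      (pvMerge A D) (ds.map pvTagD) =
      pvMerge A (List.foldl (fun a x => PySem.List.insertBy (fun p q => decide (p < q)) x a) D ds) := by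
  induction ds generalizing D with
  | nil => rfl
  | cons d ds ih =>
    simp only [List.map_cons, List.foldl_cons, pvTagD]
    rw [pvMerge_insert A D d, ih]

-- A's stable sort of the tagged concatenation IS the merge of the two sorted lists
theorem pvSorted_eq_merge (arrival departure : List Int) :
    PySem.List.sorted
      (arrival.map (fun time => (time, "arrival")) ++ departure.map (fun time => (time, "departure")))
      (fun x => x.1) false =
      pvMerge (PySem.List.sorted arrival (fun x => x) false)
        (PySem.List.sorted departure (fun x => x) false) := by
  rw [PySem.List.sorted_eq_foldl_insertBy, PySem.List.sorted_eq_foldl_insertBy,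
    PySem.List.sorted_eq_foldl_insertBy, List.foldl_append]
  have h1 : List.foldl (fun acc x => PySem.List.insertBy (fun a b => decide (a.1 < b.1)) x acc)
      ([] : List (Int × String)) (arrival.map (fun time => (time, "arrival"))) =
      (List.foldl (fun acc x => PySem.List.insertBy (fun a b => decide (a < b)) x acc) [] arrival).map
        (fun u => (u, "arrival")) := by
    have := pvFoldIns_map "arrival" arrival []
    simpa using this
  rw [h1]
  have h2 : ((List.foldl (fun acc x => PySem.List.insertBy (fun a b => decide (a < b)) x acc) [] arrival).map
      (fun u => (u, "arrival"))) =
      pvMerge (List.foldl (fun acc x => PySem.List.insertBy (fun a b => decide (a < b)) x acc) [] arrival) [] := by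
    rw [pvMerge_nil_right]; rfl
  rw [h2]
  have h3 := pvFoldIns_merge departure
    (List.foldl (fun acc x => PySem.List.insertBy (fun a b => decide (a < b)) x acc) [] arrival) []
  simpa [pvTagD] using h3

theorem pvFold_tagD (ds : List Int) (p best : Int) :
    (List.foldl pvStepA (p, best) (ds.map pvTagD)).2 = best := by
  induction ds generalizing p with
  | nil => rfl
  | cons d ds ih => simpa [pvStepA, pvTagD] using ih (p - 1)

-- folding A's loop body over the merge computes B's list-level loop
theorem pvFold_merge (as ds : List Int) (p best : Int) :
    (List.foldl pvStepA (p, best) (pvMerge as ds)).2 = pvLoopL as ds p best := by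
  induction as, ds using pvMerge.induct generalizing p best with
  | case1 ds =>
    simp only [pvMerge, pvLoopL]
    cases ds with
    | nil => rfl
    | cons d ds => exact pvFold_tagD (d :: ds) p best
  | case2 a as ih => simpa [pvMerge, pvLoopL, pvStepA] using ih (p + 1) (max best (p + 1))
  | case3 a as d ds hle ih =>
    simpa [pvMerge, pvLoopL, hle, pvStepA] using ih (p + 1) (max best (p + 1))
  | case4 a as d ds hle ih =>
    simpa [pvMerge, pvLoopL, hle, pvStepA] using ih (p - 1) best

-- B's index loop equals the list-level loop on the dropped suffixes
theorem pvLoopB_eq_loopL (arr dep : List Int) (i j : Nat) (p best : Int) :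
    pvLoopB arr dep i j p best = pvLoopL (arr.drop i) (dep.drop j) p best := by
  induction i, j, p, best using pvLoopB.induct arr dep with
  | case1 i j p best h hc ih =>
    rw [pvLoopB, dif_pos h, dif_pos hc]
    simp only [gt_iff_lt, dite_eq_ite] at ih
    rw [ih]
    have hm : (if best < p + 1 then p + 1 else best) = max best (p + 1) := by
      rw [max_def]; split_ifs <;> omega
    rw [hm, List.drop_eq_getElem_cons h]
    by_cases hj : j < dep.length
    · rw [List.drop_eq_getElem_cons hj]
      simp only [pvLoopL]
      have hc' : arr[i] ≤ dep[j] := by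
        rcases hc with hc | hc
        · omega
        · rwa [List.getD_eq_getElem dep 0 hj, List.getD_eq_getElem arr 0 h] at hc
      rw [if_pos hc']
    · rw [List.drop_eq_nil_of_le (show dep.length ≤ j by omega)]
      simp only [pvLoopL]
  | case2 i j p best h hc ih =>
    have hj : j < dep.length := by
      by_contra hj
      exact hc (Or.inl (by omega))
    rw [pvLoopB, dif_pos h, dif_neg hc, ih]
    rw [List.drop_eq_getElem_cons h, List.drop_eq_getElem_cons hj]
    simp only [pvLoopL]
    rw [List.getD_eq_getElem dep 0 hj, List.getD_eq_getElem arr 0 h] at hc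
    have : ¬ arr[i] ≤ dep[j] := fun hle => hc (Or.inr hle)
    rw [if_neg this]
  | case3 i j p best h =>
    rw [pvLoopB, dif_neg h, List.drop_eq_nil_of_le (by omega)]
    cases List.drop j dep <;> simp [pvLoopL]

-- ===== VERDICT (by name: the statement is the Claim_ definition above) =====
theorem minimum_railway_platforms_spec : Claim_equal_minimum_railway_platforms := by
  intro arrival departure _
  unfold Spec_minimum_railway_platforms minimum_railway_platforms minimum_railway_platforms_alt
  rw [pvSorted_eq_merge, pvFold_merge, pvLoopB_eq_loopL]
  rfl
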